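-- pv_equiv track=rewrite | github.com/dynos-fit/autofix | benchmarks/agent_efficiency/adapters/autofix_standalone.py | _filter_findings
-- ===== SOURCE A (Python) =====
-- from typing import Any
--
-- def _in_scope(path: str, patterns: list[str]) -> bool:
--     normalized = path.strip("/")
--     for pattern in patterns:
--         candidate = str(pattern or "").strip("/")
--         if not candidate:
--             continue
--         if normalized == candidate or normalized.startswith(candidate + "/"):
--             return True
--     return False
--
-- def _filter_findings(findings: list[dict[str, Any]], allowed_files: list[str]) -> list[dict[str, Any]]:
--     if not allowed_files:
--         return findings
--     filtered: list[dict[str, Any]] = []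
--     for finding in findings:
--         file_path = str(finding.get("file") or "")
--         if not file_path or _in_scope(file_path, allowed_files):
--             filtered.append(finding)
--     return filtered
-- ===== SOURCE B (Python) =====
-- def _filter_findings(findings, allowed_files):
--     if not allowed_files:
--         return findings
--     # Precompute the set of normalized non-empty patterns once.
--     pats = set()
--     for p in allowed_files:
--         c = str(p or "").strip("/")
--         if c:
--             pats.add(c)
--     out = []
--     for finding in findings:
--         path = str(finding.get("file") or "")
--         if not path:
--             out.append(finding)
--             continue
--         norm = path.strip("/")
--         # A pattern matches iff it equals norm or a '/'-terminated prefix of norm.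
--         if norm in pats or any(ch == "/" and norm[:i] in pats
--                                for i, ch in enumerate(norm)):
--             out.append(finding)
--     return out
-- ===== Notes on version B (the rewrite author's own statement) =====
-- stated objective: alternative
-- what changed: B precomputes the set of normalized non-empty patterns once and tests each finding's path by set lookups on the normalized path and its '/'-terminated prefixes, instead of A's per-finding rescan of all patterns with a strip+startswith test for each.
import Mathlib
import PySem

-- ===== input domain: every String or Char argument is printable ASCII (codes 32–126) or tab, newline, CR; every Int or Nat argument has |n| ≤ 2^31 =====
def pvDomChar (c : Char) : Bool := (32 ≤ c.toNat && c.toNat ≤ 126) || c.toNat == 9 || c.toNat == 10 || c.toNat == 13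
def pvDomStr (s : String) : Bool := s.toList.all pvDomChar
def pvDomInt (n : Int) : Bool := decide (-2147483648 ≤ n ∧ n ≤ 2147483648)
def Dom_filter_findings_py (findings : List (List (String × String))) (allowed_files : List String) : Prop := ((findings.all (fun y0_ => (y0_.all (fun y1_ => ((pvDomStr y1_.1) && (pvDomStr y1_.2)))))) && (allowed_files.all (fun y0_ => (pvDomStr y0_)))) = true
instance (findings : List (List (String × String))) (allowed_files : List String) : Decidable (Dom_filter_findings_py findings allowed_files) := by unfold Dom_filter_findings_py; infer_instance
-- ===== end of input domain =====

-- B replaces A's per-finding scan over all patterns (a startswith test per pattern) by a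
-- precomputed set of normalized patterns queried at the path and each of its '/'-prefixes.
-- ===== PORT A =====
-- _in_scope(path, patterns); 'str(pattern or "")' is 'pattern' itself since pattern : String
def pvInScope (path : List Char) (patterns : List String) : Bool :=
  let normalized := PySem.Chars.stripChars path ['/']
  patterns.any (fun pattern =>
    let candidate := PySem.Chars.stripChars pattern.toList ['/']
    !candidate.isEmpty &&
      (normalized == candidate || PySem.Chars.startswith normalized (candidate ++ ['/'])))

def filter_findings_py (findings : List (List (String × String))) (allowed_files : List String) : List (List (String × String)) :=
  if allowed_files.isEmpty then findings
  else
    findings.foldl (fun filtered finding =>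
      let file_path := (PySem.Dict.get? (PySem.Dict.mk finding) "file").getD ""
      if file_path.toList.isEmpty || pvInScope file_path.toList allowed_files then
        filtered ++ [finding]
      else filtered) []

-- ===== PORT B =====
-- the set of normalized non-empty patterns
def pvPats (allowed_files : List String) : PySem.Set (List Char) :=
  allowed_files.foldl (fun s p =>
    let c := PySem.Chars.stripChars p.toList ['/']
    if !c.isEmpty then PySem.Set.add s c else s) PySem.Set.empty

-- 'norm in pats or any(ch == "/" and norm[:i] in pats for i, ch in enumerate(norm))'
def pvHit (norm : List Char) (pats : PySem.Set (List Char)) : Bool :=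
  PySem.Set.contains pats norm ||
    (PySem.List.enumerate norm).any (fun p =>
      p.2 == '/' && PySem.Set.contains pats (PySem.List.slice norm none (some p.1)))

def filter_findings_py_alt (findings : List (List (String × String))) (allowed_files : List String) : List (List (String × String)) :=
  if allowed_files.isEmpty then findings
  else
    let pats := pvPats allowed_files
    findings.foldl (fun out finding =>
      let path := (PySem.Dict.get? (PySem.Dict.mk finding) "file").getD ""
      if path.toList.isEmpty then out ++ [finding]
      else if pvHit (PySem.Chars.stripChars path.toList ['/']) pats then out ++ [finding]
      else out) []

-- ===== PRECONDITION & SPEC =====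
def Spec_filter_findings_py (findings : List (List (String × String))) (allowed_files : List String) (out : List (List (String × String))) : Prop := out = filter_findings_py_alt findings allowed_files
instance (findings : List (List (String × String))) (allowed_files : List String) (out : List (List (String × String))) : Decidable (Spec_filter_findings_py findings allowed_files out) := by unfold Spec_filter_findings_py; infer_instance

-- ===== CLAIM (what is proved, stated in full; the proofs are below) =====
def Claim_equal_filter_findings_py : Prop := ∀ (findings : List (List (String × String))) (allowed_files : List String), Dom_filter_findings_py findings allowed_files → Spec_filter_findings_py findings allowed_files (filter_findings_py findings allowed_files)

-- ===== LEMMAS AND PROOFS =====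

-- invariant of the pattern-set fold, for any starting accumulator
theorem mem_pvPats_aux (l : List String) (s : PySem.Set (List Char)) (x : List Char) :
    x ∈ l.foldl (fun s p =>
      let c := PySem.Chars.stripChars p.toList ['/']
      if !c.isEmpty then PySem.Set.add s c else s) s ↔
      x ∈ s ∨ (¬ x.isEmpty ∧ ∃ p ∈ l, PySem.Chars.stripChars p.toList ['/'] = x) := by
  induction l generalizing s with
  | nil => simp
  | cons hd tl ih =>
    simp only [List.foldl_cons, ih, List.mem_cons]
    by_cases h : (PySem.Chars.stripChars hd.toList ['/']).isEmpty
    · simp [h]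
      constructor
      · rintro (h1 | h1)
        · left; exact h1
        · right; exact ⟨h1.1, Or.inr h1.2⟩
      · rintro (h1 | ⟨hx, (rfl | hp)⟩)
        · left; exact h1
        · exact absurd h (by simpa using hx)
        · right; exact ⟨hx, hp⟩
    · simp [h, PySem.Set.mem_add]
      constructor
      · rintro ((h1 | rfl) | h1)
        · left; exact h1
        · right; exact ⟨by simpa using h, Or.inl rfl⟩
        · right; exact ⟨h1.1, Or.inr h1.2⟩
      · rintro (h1 | ⟨hx, (rfl | hp)⟩)
        · left; left; exact h1
        · left; right; rfl
        · right; exact ⟨hx, hp⟩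

-- membership in the precomputed pattern set
theorem mem_pvPats (allowed_files : List String) (x : List Char) :
    x ∈ pvPats allowed_files ↔
      ¬ x.isEmpty ∧ ∃ p ∈ allowed_files, PySem.Chars.stripChars p.toList ['/'] = x := by
  unfold pvPats
  rw [mem_pvPats_aux]
  simp [PySem.Set.empty]

-- A's match test, characterized: c matches norm iff c is norm or a '/'-terminated prefix of norm
theorem match_iff (norm c : List Char) :
    (norm = c ∨ PySem.Chars.startswith norm (c ++ ['/']) = true) ↔
      (c = norm ∨ ∃ i : Nat, norm[i]? = some '/' ∧ c = norm.take i) := by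
  simp only [PySem.Chars.startswith_iff]
  constructor
  · rintro (rfl | ⟨t, ht⟩)
    · left; rfl
    · right
      refine ⟨c.length, ?_, ?_⟩
      · rw [← ht]; simp
      · rw [← ht]; simp
  · rintro (rfl | ⟨i, hi, rfl⟩)
    · left; rfl
    · right
      have hlt : i < norm.length := (List.getElem?_eq_some_iff.mp hi).1
      have hv : norm[i] = '/' := (List.getElem?_eq_some_iff.mp hi).2
      refine ⟨norm.drop (i+1), ?_⟩
      have : norm.take i ++ '/' :: norm.drop (i+1) = norm := by
        rw [← hv, ← List.drop_eq_getElem_cons hlt, List.take_append_drop]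
      simpa using this

-- A's scan over the patterns equals B's set lookup at the path and its '/'-prefixes
theorem inScope_eq_hit (path : List Char) (allowed_files : List String) :
    pvInScope path allowed_files =
      pvHit (PySem.Chars.stripChars path ['/']) (pvPats allowed_files) := by
  unfold pvInScope pvHit
  rw [Bool.eq_iff_iff]
  simp only [List.any_eq_true, Bool.and_eq_true, Bool.or_eq_true, Bool.not_eq_true',
    PySem.Set.contains_iff, mem_pvPats, PySem.List.mem_enumerate_iff, beq_iff_eq]
  constructor
  · rintro ⟨pat, hpat, hne, hmatch⟩
    rcases (match_iff _ _).mp hmatch with heq | ⟨i, hi, heq⟩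
    · left
      exact ⟨by simp [heq] at hne ⊢; simp [hne], pat, hpat, heq⟩
    · right
      have hlt : i < (PySem.Chars.stripChars path ['/']).length :=
        (List.getElem?_eq_some_iff.mp hi).1
      refine ⟨((i : Int), '/'), ⟨i, hlt, by simp [(List.getElem?_eq_some_iff.mp hi).2]⟩, rfl, ?_⟩
      have : PySem.List.slice (PySem.Chars.stripChars path ['/']) none (some ((i : Nat) : Int))
          = (PySem.Chars.stripChars path ['/']).take i := PySem.List.slice_to_natCast _ _
      rw [this, ← heq]
      exact ⟨by simp [hne], pat, hpat, rfl⟩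
  · rintro (⟨hne, pat, hpat, hstrip⟩ | ⟨x, ⟨k, hk, rfl⟩, hslash, hmem⟩)
    · refine ⟨pat, hpat, by simp [hstrip]; simpa using hne, ?_⟩
      rw [match_iff]
      left; exact hstrip
    · simp only [zero_add] at hslash hmem
      rw [PySem.List.slice_to_natCast] at hmem
      obtain ⟨hne, pat, hpat, hstrip⟩ := hmem
      refine ⟨pat, hpat, by simp [hstrip]; simpa using hne, ?_⟩
      rw [match_iff]
      right
      exact ⟨k, by rw [List.getElem?_eq_getElem hk]; simpa using hslash, hstrip⟩

-- ===== VERDICT (by name: the statement is the Claim_ definition above) =====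
theorem filter_findings_py_spec : Claim_equal_filter_findings_py := by
  intro findings allowed_files _
  unfold Spec_filter_findings_py filter_findings_py filter_findings_py_alt
  by_cases h : allowed_files.isEmpty
  · simp [h]
  · simp only [h, Bool.false_eq_true, not_false_eq_true, if_neg]
    apply PySem.List.foldl_congr_mem
    intro acc finding _
    rw [inScope_eq_hit]
    by_cases hp : ((PySem.Dict.get? (PySem.Dict.mk finding) "file").getD "").toList.isEmpty <;> simp [hp]
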